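-- pv_equiv track=rewrite | github.com/Anpoe/visualisation-of-data-points-using-sankey-diagram | programming exam/ascending_order.py | ascending_order
-- ===== SOURCE A (Python) =====
-- def ascending_order(updates):
--     """Remove out of order entries of the list of updates.
--
--     Args:
--         updates (list): List from which zeroes will be removed.
--     """
--     # Insert your code here
--
--     # set counter as a stop determinate
--     counter = 1
--     # while loop to travel throughout the number in lists
--     while counter < len(updates):
--         # If the number after is smaller than the one before, delete it
--         if updates[counter] < updates[counter - 1]:
--             del updates[counter]
--         else:
--             counter += 1
--     return updates
-- ===== SOURCE B (Python) =====
-- def ascending_order(updates):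
--     """Remove out of order entries of the list of updates.
--
--     Args:
--         updates (list): List from which zeroes will be removed.
--     """
--     result = []
--     for x in updates:
--         if not result or x >= result[-1]:
--             result.append(x)
--     updates[:] = result  # A mutates in place; keep the same visible side effect
--     return updates
-- ===== Notes on version B (the rewrite author's own statement) =====
-- stated objective: faster
-- what changed: Single forward pass appending each element that is >= the last kept value, instead of repeatedly deleting from the list inside a while loop with a stalled counter.
import Mathlib
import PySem

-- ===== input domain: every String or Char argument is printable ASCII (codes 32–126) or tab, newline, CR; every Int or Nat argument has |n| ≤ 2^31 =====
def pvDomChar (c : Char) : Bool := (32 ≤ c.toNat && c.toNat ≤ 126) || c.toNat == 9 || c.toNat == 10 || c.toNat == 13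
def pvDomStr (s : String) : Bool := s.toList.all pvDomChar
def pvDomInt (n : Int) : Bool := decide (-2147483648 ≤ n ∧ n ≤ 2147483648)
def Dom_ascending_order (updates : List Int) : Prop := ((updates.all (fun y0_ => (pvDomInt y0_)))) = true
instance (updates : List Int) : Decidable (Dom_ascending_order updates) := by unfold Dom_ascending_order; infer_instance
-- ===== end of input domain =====

-- B replaces A's quadratic delete-in-place while loop by one linear pass keeping elements ≥ the last
-- kept value (B also performs the same in-place mutation in Python; equivalence proved on the return value).


-- ===== PORT A =====
-- A's while loop: counter starts at 1; delete updates[counter] when it is < updates[counter-1],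
-- else advance counter.  Both indices are always in range (1 ≤ counter < length), so getD is exact.
def ascLoopA (updates : List Int) (counter : Nat) : List Int :=
  if _h : counter < updates.length then
    if updates.getD counter 0 < updates.getD (counter - 1) 0 then
      ascLoopA (updates.eraseIdx counter) counter
    else
      ascLoopA updates (counter + 1)
  else updates
termination_by updates.length - counter
decreasing_by
  · have : (updates.eraseIdx counter).length = updates.length - 1 :=
      List.length_eraseIdx_of_lt _h
    omega
  · omega

def ascending_order (updates : List Int) : List Int := ascLoopA updates 1

-- ===== PORT B =====
-- B's loop over the tail, tracking the last kept value.
def ascGoB (last : Int) : List Int → List Int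
  | [] => []
  | y :: ys => if y < last then ascGoB last ys else y :: ascGoB y ys

def ascending_order_alt (updates : List Int) : List Int :=
  match updates with
  | [] => []
  | x :: xs => x :: ascGoB x xs

-- ===== PRECONDITION & SPEC =====
def Spec_ascending_order (updates : List Int) (out : List Int) : Prop := out = ascending_order_alt updates
instance (updates : List Int) (out : List Int) : Decidable (Spec_ascending_order updates out) := by unfold Spec_ascending_order; infer_instance

-- ===== CLAIM (what is proved, stated in full; the proofs are below) =====
def Claim_equal_ascending_order : Prop := ∀ (updates : List Int), Dom_ascending_order updates → Spec_ascending_order updates (ascending_order updates)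

-- ===== LEMMAS AND PROOFS =====
theorem getD_append_cons (kept : List Int) (y : Int) (ys : List Int) :
    (kept ++ y :: ys).getD kept.length 0 = y := by
  induction kept with
  | nil => rfl
  | cons a t ih => simpa using ih

theorem getD_append_last (kept : List Int) (rest : List Int) (h : kept ≠ []) :
    (kept ++ rest).getD (kept.length - 1) 0 = kept.getLast h := by
  induction kept with
  | nil => exact absurd rfl h
  | cons a t ih =>
    cases t with
    | nil => rfl
    | cons b u =>
      have := ih (by simp)
      simpa [List.getLast] using this

theorem eraseIdx_append_cons (kept : List Int) (y : Int) (ys : List Int) :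
    (kept ++ y :: ys).eraseIdx kept.length = kept ++ ys := by
  induction kept with
  | nil => rfl
  | cons a t ih => simpa using ih

theorem ascLoopA_invariant (rest kept : List Int) (h : kept ≠ []) :
    ascLoopA (kept ++ rest) kept.length = kept ++ ascGoB (kept.getLast h) rest := by
  induction rest generalizing kept with
  | nil => rw [ascLoopA]; simp [ascGoB]
  | cons y ys ih =>
    rw [ascLoopA]
    have hlt : kept.length < (kept ++ y :: ys).length := by simp
    rw [dif_pos hlt, getD_append_cons, getD_append_last kept _ h]
    by_cases hc : y < kept.getLast h
    · rw [if_pos hc, eraseIdx_append_cons, ih kept h, ascGoB, if_pos hc]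
    · rw [if_neg hc]
      have hne : kept ++ [y] ≠ [] := by simp
      have h1 : kept.length + 1 = (kept ++ [y]).length := by simp
      have h2 : kept ++ y :: ys = (kept ++ [y]) ++ ys := by simp
      rw [h2, h1, ih (kept ++ [y]) hne]
      simp [ascGoB, if_neg hc]

-- ===== VERDICT (by name: the statement is the Claim_ definition above) =====
theorem ascending_order_spec : Claim_equal_ascending_order := by
  intro updates _
  unfold Spec_ascending_order ascending_order ascending_order_alt
  cases updates with
  | nil => rw [ascLoopA]; simp
  | cons x xs =>
    have := ascLoopA_invariant xs [x] (by simp)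
    simpa using this
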